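-- pv_equiv track=rewrite | github.com/huangziwei/nik | nik/sanitize.py | _is_all_caps_block
-- ===== SOURCE A (Python) =====
-- def _is_all_caps_block(text: str) -> bool:
--     has_letter = False
--     for ch in text:
--         if ch.islower():
--             return False
--         if ch.isupper():
--             has_letter = True
--     return has_letter
-- ===== SOURCE B (Python) =====
-- _LOWERCASE = frozenset("abcdefghijklmnopqrstuvwxyz")
-- _UPPERCASE = frozenset("ABCDEFGHIJKLMNOPQRSTUVWXYZ")
--
--
-- def _is_all_caps_block(text: str) -> bool:
--     chars = set(text)
--     return chars.isdisjoint(_LOWERCASE) and not chars.isdisjoint(_UPPERCASE)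
-- ===== Notes on version B (the rewrite author's own statement) =====
-- stated objective: alternative
-- what changed: Instead of scanning the text character by character with case predicates and an early-exit flag, B builds the set of distinct characters once and decides the result by set algebra: disjointness from a fixed lowercase alphabet and non-disjointness from a fixed uppercase alphabet.
import Mathlib
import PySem

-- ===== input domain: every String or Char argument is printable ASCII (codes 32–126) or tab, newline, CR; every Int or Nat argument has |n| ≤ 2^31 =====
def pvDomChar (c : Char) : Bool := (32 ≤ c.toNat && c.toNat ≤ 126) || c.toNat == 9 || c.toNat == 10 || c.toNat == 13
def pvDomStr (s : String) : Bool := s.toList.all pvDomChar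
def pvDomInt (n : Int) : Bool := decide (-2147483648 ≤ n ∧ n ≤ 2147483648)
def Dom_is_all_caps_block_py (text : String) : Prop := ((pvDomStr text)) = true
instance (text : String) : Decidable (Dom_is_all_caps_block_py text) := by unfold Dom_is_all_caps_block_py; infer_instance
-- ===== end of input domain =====

-- B replaces A's early-exit character scan with set algebra: the set of distinct characters
-- is built once and compared (disjointness) against fixed lowercase/uppercase alphabets; same O(n) cost.

-- ===== PORT A =====
-- the for-loop of A: early return False on a lowercase char, otherwise thread the has_letter flag
def isAllCapsLoop (cs : List Char) (hasLetter : Bool) : Bool :=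
  match cs with
  | [] => hasLetter
  | c :: rest =>
      if PySem.Chars.islower c then false
      else isAllCapsLoop rest (if PySem.Chars.isupper c then true else hasLetter)

def is_all_caps_block_py (text : String) : Bool :=
  isAllCapsLoop text.toList false

-- ===== PORT B =====
-- the fixed alphabets _LOWERCASE / _UPPERCASE of Source B (as sets: distinct elements)
def pvLowerAlphabet : PySem.Set Char :=
  ['a','b','c','d','e','f','g','h','i','j','k','l','m','n','o','p','q','r','s','t','u','v','w','x','y','z']
def pvUpperAlphabet : PySem.Set Char :=
  ['A','B','C','D','E','F','G','H','I','J','K','L','M','N','O','P','Q','R','S','T','U','V','W','X','Y','Z']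

def is_all_caps_block_py_alt (text : String) : Bool :=
  let chars : PySem.Set Char := PySem.Set.ofList text.toList
  PySem.Set.isdisjoint chars pvLowerAlphabet && !(PySem.Set.isdisjoint chars pvUpperAlphabet)

-- ===== PRECONDITION & SPEC =====
def Spec_is_all_caps_block_py (text : String) (out : Bool) : Prop := out = is_all_caps_block_py_alt text
instance (text : String) (out : Bool) : Decidable (Spec_is_all_caps_block_py text out) := by unfold Spec_is_all_caps_block_py; infer_instance

-- ===== CLAIM (what is proved, stated in full; the proofs are below) =====
def Claim_equal_is_all_caps_block_py : Prop := ∀ (text : String), Dom_is_all_caps_block_py text → Spec_is_all_caps_block_py text (is_all_caps_block_py text)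

-- ===== LEMMAS AND PROOFS =====

-- A's loop computes: no lowercase char, and (flag already set or some uppercase char)
lemma isAllCapsLoop_eq (cs : List Char) (h : Bool) :
    isAllCapsLoop cs h
      = ((!(cs.any (fun c => PySem.Chars.islower c))) &&
          (h || cs.any (fun c => PySem.Chars.isupper c))) := by
  induction cs generalizing h with
  | nil => simp [isAllCapsLoop]
  | cons c rest ih =>
      by_cases hl : PySem.Chars.islower c
      · simp [isAllCapsLoop, hl]
      · by_cases hu : PySem.Chars.isupper c <;>
          simp [isAllCapsLoop, hl, hu, ih]

-- membership in the fixed lowercase alphabet is exactly Python's ASCII islower test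
lemma contains_lower (c : Char) :
    List.contains pvLowerAlphabet c = PySem.Chars.islower c := by
  have h2 : c ∈ (pvLowerAlphabet : List Char) ↔ (97 ≤ c.toNat ∧ c.toNat ≤ 122) := by
    constructor
    · intro h
      simp only [pvLowerAlphabet, List.mem_cons, List.not_mem_nil, or_false] at h
      rcases h with rfl|rfl|rfl|rfl|rfl|rfl|rfl|rfl|rfl|rfl|rfl|rfl|rfl|rfl|rfl|rfl|rfl|rfl|rfl|rfl|rfl|rfl|rfl|rfl|rfl|rfl <;> decide
    · rintro ⟨a, b⟩
      have hc : c = Char.ofNat c.toNat := by simp [Char.ofNat_toNat]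
      rw [hc]; interval_cases h : c.toNat <;> decide
  have h3 : PySem.Chars.islower c = decide (97 ≤ c.toNat ∧ c.toNat ≤ 122) := by
    simp only [PySem.Chars.islower]
    by_cases h : (97 ≤ c.toNat ∧ c.toNat ≤ 122)
    · simp [h]; exact ⟨h.1, h.2⟩
    · simp [h]
      intro ha; by_contra hb
      exact h ⟨ha, le_of_not_gt (fun hg => hb hg)⟩
  rw [h3]
  simp [h2]

-- membership in the fixed uppercase alphabet is exactly Python's ASCII isupper test
lemma contains_upper (c : Char) :
    List.contains pvUpperAlphabet c = PySem.Chars.isupper c := by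
  have h2 : c ∈ (pvUpperAlphabet : List Char) ↔ (65 ≤ c.toNat ∧ c.toNat ≤ 90) := by
    constructor
    · intro h
      simp only [pvUpperAlphabet, List.mem_cons, List.not_mem_nil, or_false] at h
      rcases h with rfl|rfl|rfl|rfl|rfl|rfl|rfl|rfl|rfl|rfl|rfl|rfl|rfl|rfl|rfl|rfl|rfl|rfl|rfl|rfl|rfl|rfl|rfl|rfl|rfl|rfl <;> decide
    · rintro ⟨a, b⟩
      have hc : c = Char.ofNat c.toNat := by simp [Char.ofNat_toNat]
      rw [hc]; interval_cases h : c.toNat <;> decide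
  have h3 : PySem.Chars.isupper c = decide (65 ≤ c.toNat ∧ c.toNat ≤ 90) := by
    simp only [PySem.Chars.isupper]
    by_cases h : (65 ≤ c.toNat ∧ c.toNat ≤ 90)
    · simp [h]; exact ⟨h.1, h.2⟩
    · simp [h]
      intro ha; by_contra hb
      exact h ⟨ha, le_of_not_gt (fun hg => hb hg)⟩
  rw [h3]
  simp [h2]

-- deduplication does not change an existential scan
lemma any_ofList (l : List Char) (p : Char → Bool) :
    (PySem.Set.ofList l : List Char).any p = l.any p := by
  apply Bool.eq_iff_iff.mpr
  simp only [List.any_eq_true]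
  constructor
  · rintro ⟨x, hx, hp⟩; exact ⟨x, (PySem.Set.mem_ofList l x).mp hx, hp⟩
  · rintro ⟨x, hx, hp⟩; exact ⟨x, (PySem.Set.mem_ofList l x).mpr hx, hp⟩

-- ===== VERDICT (by name: the statement is the Claim_ definition above) =====
theorem is_all_caps_block_py_spec : Claim_equal_is_all_caps_block_py := by
  intro text _
  unfold Spec_is_all_caps_block_py is_all_caps_block_py is_all_caps_block_py_alt
  simp only [isAllCapsLoop_eq, PySem.Set.isdisjoint, PySem.Set.contains,
    any_ofList, Bool.false_or, Bool.not_not]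
  simp only [contains_lower, contains_upper]
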